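-- pv_equiv track=rewrite | github.com/gimboleo/studia_public | semestr 1/wdi/lista 5/zad1.py | pot
-- ===== SOURCE A (Python) =====
-- def pot(a, b):
--     x = 0
--     rez = 1
--     while b>0:
--         if b%2:
--             rez = rez * a
--             x = x + 1
--         b = b // 2
--         a = a * a
--         x = x + 1
--     return x
-- ===== SOURCE B (Python) =====
-- def pot(a, b):
--     # A's loop counter equals bit_length(b) + popcount(b) for b > 0, else 0.
--     return b.bit_length() + bin(b).count("1") if b > 0 else 0
-- ===== Notes on version B (the rewrite author's own statement) =====
-- stated objective: faster
-- what changed: Replaces the squaring loop with the closed form bit_length(b) + popcount(b) for b > 0 (0 otherwise), since the loop's counter x counts one step per bit plus one per set bit of b.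
import Mathlib
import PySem

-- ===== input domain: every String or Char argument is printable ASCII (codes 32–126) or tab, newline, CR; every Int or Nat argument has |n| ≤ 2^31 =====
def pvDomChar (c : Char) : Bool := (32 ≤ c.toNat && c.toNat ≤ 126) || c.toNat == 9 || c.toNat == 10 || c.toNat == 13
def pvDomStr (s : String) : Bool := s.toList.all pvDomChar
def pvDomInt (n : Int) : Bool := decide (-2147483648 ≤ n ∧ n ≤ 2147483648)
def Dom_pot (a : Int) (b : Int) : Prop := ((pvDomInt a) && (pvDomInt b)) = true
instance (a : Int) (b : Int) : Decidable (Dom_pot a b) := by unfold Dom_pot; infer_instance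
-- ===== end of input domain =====

-- ===== PORT A =====
-- B replaces A's squaring loop by the closed form bitLength b + bitCount b (for b > 0); faster: no multiplications.
def potLoop (a : Int) (b : Int) (x : Int) (rez : Int) : Int :=
  if h : b > 0 then
    let xr := if PySem.Int.mod b 2 ≠ 0 then (x + 1, rez * a) else (x, rez)
    potLoop (a * a) (PySem.Int.floordiv b 2) (xr.1 + 1) xr.2
  else x
termination_by b.toNat
decreasing_by
  rw [PySem.Int.floordiv_eq_ediv_of_pos (by omega)]
  omega

def pot (a : Int) (b : Int) : Int := potLoop a b 0 1

-- ===== PORT B =====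
def pot_alt (a : Int) (b : Int) : Int :=
  if b > 0 then ((PySem.Int.bitLength b + PySem.Int.bitCount b : Nat) : Int) else 0

-- ===== PRECONDITION & SPEC =====
def Spec_pot (a : Int) (b : Int) (out : Int) : Prop := out = pot_alt a b
instance (a : Int) (b : Int) (out : Int) : Decidable (Spec_pot a b out) := by unfold Spec_pot; infer_instance

-- ===== CLAIM (what is proved, stated in full; the proofs are below) =====
def Claim_equal_pot : Prop := ∀ (a : Int) (b : Int), Dom_pot a b → Spec_pot a b (pot a b)

-- ===== LEMMAS AND PROOFS =====

theorem potLoop_closed (n : Nat) : ∀ (a x rez : Int),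
    potLoop a (n : Int) x rez =
      x + (if n = 0 then 0 else ((PySem.Int.bitLength (n : Int) + PySem.Int.bitCount (n : Int) : Nat) : Int)) := by
  induction n using Nat.strong_induction_on with
  | _ n ih =>
    intro a x rez
    by_cases h0 : n = 0
    · subst h0
      rw [potLoop]
      simp
    · have hpos : (0 : Int) < (n : Int) := by exact_mod_cast Nat.pos_of_ne_zero h0
      rw [potLoop]
      rw [dif_pos hpos]
      have hfd : PySem.Int.floordiv (n : Int) 2 = ((n / 2 : Nat) : Int) :=
        PySem.Int.floordiv_natCast n 2
      have hmd : PySem.Int.mod (n : Int) 2 = ((n % 2 : Nat) : Int) :=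
        PySem.Int.mod_natCast n 2
      have hlt : n / 2 < n := Nat.div_lt_self (Nat.pos_of_ne_zero h0) (by omega)
      have hbl := PySem.Int.bitLength_natCast (Nat.pos_of_ne_zero h0)
      have hbc := PySem.Int.bitCount_natCast (Nat.pos_of_ne_zero h0)
      rw [hfd, hmd]
      rw [ih (n / 2) hlt]
      by_cases hodd : n % 2 = 0
      · have hhalf : n / 2 ≠ 0 := by omega
        simp only [Nat.cast_zero, ne_eq, not_true_eq_false, if_false, if_neg hhalf,
          if_neg h0, hbl, hbc, hodd]
        push_cast
        ring
      · have h1 : n % 2 = 1 := by omega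
        by_cases hhalf : n / 2 = 0
        · have hn1 : n = 1 := by omega
          subst hn1
          have e1 : PySem.Int.bitLength 1 = 1 := by decide
          have e2 : PySem.Int.bitCount 1 = 1 := by decide
          simp [e1, e2]
          omega
        · simp only [Nat.cast_one, ne_eq, one_ne_zero, not_false_eq_true, if_true,
            if_neg hhalf, if_neg h0, hbl, hbc, h1]
          push_cast
          ring

-- ===== VERDICT (by name: the statement is the Claim_ definition above) =====
theorem pot_spec : Claim_equal_pot := by
  intro a b _
  unfold Spec_pot pot pot_alt
  by_cases hb : b > 0
  · have hn : b = ((b.toNat : Nat) : Int) := by omega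
    have hne : b.toNat ≠ 0 := by omega
    rw [hn, potLoop_closed, if_neg hne, if_pos (by exact_mod_cast hn ▸ hb)]
    ring
  · rw [potLoop, dif_neg hb, if_neg hb]
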